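-- pv_equiv track=rewrite | github.com/leochirag/Moloco_SWE | Moloco_Q1.py | equalsWhenOneCharRemoved
-- ===== SOURCE A (Python) =====
-- def equalsWhenOneCharRemoved(x, y):
--
--     len_x = len(x)
--     len_y = len(y)
--
--     # Cannot have both strings of same lengths as removal of one character will result in unequal strings
--     if len_x == len_y:
--         return False
--
--     # Difference in the lengths of two strings should be strictly 1
--     if abs(len_x - len_y) > 1:
--         return False
--
--     string_1 = None
--     string_2 = None
--     if len_x > len_y:
--         string_1 = x
--         string_2 = y
--     else:
--         string_1 = y
--         string_2 = x
--
--     count = 0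
--     i = 0
--     j = 0
--
--     while i < len(string_1) and j < len(string_2):
--         char_1 = string_1[i]
--         char_2 = string_2[j]
--
--         if char_1 != char_2:
--             if count > 0:
--                 return False
--             i = i + 1
--             count = count + 1
--             #continue
--
--         else:
--             i = i + 1
--             j = j + 1
--             #continue
--
--     return True
-- ===== SOURCE B (Python) =====
-- def equalsWhenOneCharRemoved(x, y):
--     if abs(len(x) - len(y)) != 1:
--         return False
--     longer, shorter = (x, y) if len(x) > len(y) else (y, x)
--     n = len(shorter)
--     p = 0
--     while p < n and longer[p] == shorter[p]:
--         p += 1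
--     s = 0
--     while s < n and longer[-1 - s] == shorter[-1 - s]:
--         s += 1
--     return p + s >= n
-- ===== Notes on version B (the rewrite author's own statement) =====
-- stated objective: alternative
-- what changed: Replaces A's merged one-skip two-pointer walk (skip counter, resynchronised indices) with two independent counting passes - common-prefix length p and common-suffix length s - accepting iff p + s >= len(shorter).
import Mathlib
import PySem

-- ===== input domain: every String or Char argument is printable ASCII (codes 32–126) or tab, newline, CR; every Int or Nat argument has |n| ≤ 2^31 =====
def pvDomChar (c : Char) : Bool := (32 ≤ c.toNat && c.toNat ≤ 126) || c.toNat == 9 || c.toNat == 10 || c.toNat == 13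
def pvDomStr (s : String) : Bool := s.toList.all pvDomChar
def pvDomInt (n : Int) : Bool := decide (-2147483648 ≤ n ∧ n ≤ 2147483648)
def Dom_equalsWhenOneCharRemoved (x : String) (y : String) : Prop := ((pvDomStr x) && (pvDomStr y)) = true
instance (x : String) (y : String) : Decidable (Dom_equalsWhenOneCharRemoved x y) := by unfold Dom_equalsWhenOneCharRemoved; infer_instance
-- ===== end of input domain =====

-- B replaces A's merged one-skip two-pointer loop with two independent counting
-- passes (common-prefix length + common-suffix length) and the test p + s ≥ n;
-- objective: a genuinely different decomposition of the same linear-time task.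

-- ===== PORT A =====
-- A's while loop over indices i, j with the skip counter `count`, transcribed as the
-- structural recursion over the two character lists (same state: remainder at i, remainder at j, count).
def ewocrLoop : List Char → List Char → Nat → Bool
  | c1 :: s1, c2 :: s2, count =>
      if c1 ≠ c2 then
        if count > 0 then false
        else ewocrLoop s1 (c2 :: s2) (count + 1)
      else ewocrLoop s1 s2 count
  | _, _, _ => true
termination_by l s _ => l.length + s.length

def equalsWhenOneCharRemoved (x : String) (y : String) : Bool :=
  let len_x := x.length
  let len_y := y.length
  if len_x = len_y then false
  else if ((len_x : Int) - (len_y : Int)).natAbs > 1 then false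
  else
    let string_1 := if len_x > len_y then x else y
    let string_2 := if len_x > len_y then y else x
    ewocrLoop string_1.toList string_2.toList 0

-- ===== PORT B =====
-- B's `while p < n and longer[p] == shorter[p]: p += 1` counting pass: the number of
-- equal characters walking both lists from the front (stops at n = shorter's length,
-- exactly when the shorter list is exhausted).
def bMatchLen : List Char → List Char → Nat
  | a :: as, b :: bs => if a = b then bMatchLen as bs + 1 else 0
  | _, _ => 0

def equalsWhenOneCharRemoved_alt (x : String) (y : String) : Bool :=
  if ((x.length : Int) - (y.length : Int)).natAbs ≠ 1 then false
  else
    let longer := if x.length > y.length then x else y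
    let shorter := if x.length > y.length then y else x
    let n := shorter.length
    -- prefix pass
    let p := bMatchLen longer.toList shorter.toList
    -- suffix pass: B counts matches at indices -1-s from the end, i.e. the same
    -- front-to-back count on the reversed character lists
    let s := bMatchLen longer.toList.reverse shorter.toList.reverse
    decide (p + s ≥ n)

-- ===== PRECONDITION & SPEC =====
def Spec_equalsWhenOneCharRemoved (x : String) (y : String) (out : Bool) : Prop := out = equalsWhenOneCharRemoved_alt x y
instance (x : String) (y : String) (out : Bool) : Decidable (Spec_equalsWhenOneCharRemoved x y out) := by unfold Spec_equalsWhenOneCharRemoved; infer_instance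

-- ===== CLAIM (what is proved, stated in full; the proofs are below) =====
def Claim_equal_equalsWhenOneCharRemoved : Prop := ∀ (x : String) (y : String), Dom_equalsWhenOneCharRemoved x y → Spec_equalsWhenOneCharRemoved x y (equalsWhenOneCharRemoved x y)

-- ===== LEMMAS AND PROOFS =====

-- After A has already skipped one char (count = 1), its loop on equal-length remainders
-- returns true iff they are equal.
theorem ewocrLoop_one (l s : List Char) (h : l.length = s.length) :
    ewocrLoop l s 1 = (l == s) := by
  induction l generalizing s with
  | nil =>
    cases s with
    | nil => simp [ewocrLoop]
    | cons c cs => simp at h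
  | cons c1 l ih =>
    cases s with
    | nil => simp at h
    | cons c2 s =>
      rw [ewocrLoop]
      by_cases hc : c1 = c2
      · subst hc
        rw [if_neg (by simp), ih s (by simpa using h)]
        simp
      · rw [if_pos hc, if_pos (by omega)]
        simp [hc]

-- A's loop consumes a common prefix without changing count.
theorem ewocrLoop_prefix (t l s : List Char) :
    ewocrLoop (t ++ l) (t ++ s) 0 = ewocrLoop l s 0 := by
  induction t with
  | nil => rfl
  | cons c t ih =>
    rw [List.cons_append, List.cons_append, ewocrLoop, if_neg (by simp)]
    exact ih

-- Every pair of lists splits as common prefix of length bMatchLen plus remainders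
-- whose match length is 0.
theorem bMatchLen_decomp (a b : List Char) :
    ∃ t a' b', a = t ++ a' ∧ b = t ++ b' ∧ t.length = bMatchLen a b ∧ bMatchLen a' b' = 0 := by
  induction a generalizing b with
  | nil => exact ⟨[], [], b, rfl, rfl, by cases b <;> simp [bMatchLen], by cases b <;> simp [bMatchLen]⟩
  | cons c as ih =>
    cases b with
    | nil => exact ⟨[], c :: as, [], rfl, rfl, by simp [bMatchLen], by simp [bMatchLen]⟩
    | cons d bs =>
      by_cases hc : c = d
      · subst hc
        obtain ⟨t, a', b', ha, hb, ht, h0⟩ := ih bs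
        exact ⟨c :: t, a', b', by simp [ha], by simp [hb], by simp [bMatchLen, ht], h0⟩
      · exact ⟨[], c :: as, d :: bs, rfl, rfl, by simp [bMatchLen, hc], by simp [bMatchLen, hc]⟩

-- Characterisation: the first j characters agree iff j ≤ bMatchLen.
theorem take_eq_iff_le_bMatchLen (a : List Char) :
    ∀ (b : List Char) (j : Nat), j ≤ a.length → j ≤ b.length →
      (a.take j = b.take j ↔ j ≤ bMatchLen a b) := by
  induction a with
  | nil =>
    intro b j hja hjb
    have hj0 : j = 0 := Nat.le_zero.mp hja
    subst hj0
    simp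
  | cons c as ih =>
    intro b j hja hjb
    cases b with
    | nil =>
      have hj0 : j = 0 := Nat.le_zero.mp hjb
      subst hj0
      simp
    | cons d bs =>
      cases j with
      | zero => simp
      | succ m =>
        simp only [List.take_succ_cons]
        by_cases hc : c = d
        · subst hc
          rw [bMatchLen, if_pos rfl]
          constructor
          · intro h
            have := (ih bs m (by simpa using hja) (by simpa using hjb)).mp (by simpa using h)
            omega
          · intro h
            have := (ih bs m (by simpa using hja) (by simpa using hjb)).mpr (by omega)
            simp [this]
        · rw [bMatchLen, if_neg hc]
          constructor
          · intro h; simp at h; exact absurd h.1 hc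
          · omega

-- Main bridge: on lengths differing by exactly one, A's loop equals B's p + s ≥ n test.
theorem ewocrLoop_eq_counts (l s : List Char) (h : l.length = s.length + 1) :
    ewocrLoop l s 0
      = decide (bMatchLen l s + bMatchLen l.reverse s.reverse ≥ s.length) := by
  obtain ⟨t, l₂, s₂, hl, hs, ht, h0⟩ := bMatchLen_decomp l s
  subst hl; subst hs
  rw [ewocrLoop_prefix]
  have hlen : l₂.length = s₂.length + 1 := by
    simp only [List.length_append] at h; omega
  cases s₂ with
  | nil =>
    -- shorter is a prefix of longer: A returns true, and p = n already.
    cases l₂ with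
    | nil => simp at hlen
    | cons c l₂' =>
      rw [show ewocrLoop (c :: l₂') [] 0 = true from by simp [ewocrLoop]]
      have : t.length + 0 ≥ (t ++ ([] : List Char)).length := by simp
      simp only [← ht]
      symm
      rw [decide_eq_true_iff]
      omega
  | cons c2 ss =>
    cases l₂ with
    | nil => simp at hlen
    | cons c1 l₂' =>
      have hc : c1 ≠ c2 := by
        intro hceq
        subst hceq
        rw [bMatchLen, if_pos rfl] at h0
        omega
      rw [ewocrLoop, if_pos hc, if_neg (by omega),
          ewocrLoop_one l₂' (c2 :: ss) (by simpa using hlen)]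
      -- suffix count: last (c2::ss).length chars agree iff l₂' = c2 :: ss
      have hlen' : l₂'.length = (c2 :: ss).length := by simpa using hlen
      have hlen'' : l₂'.length = ss.length + 1 := by simpa using hlen
      have hrevl : (t ++ c1 :: l₂').reverse.take (c2 :: ss).length = l₂'.reverse := by
        rw [List.reverse_append, List.reverse_cons, List.append_assoc,
            List.take_append_of_le_length (by simp [hlen'.symm])]
        rw [List.take_of_length_le (by simp [hlen'.symm])]
      have hrevs : (t ++ c2 :: ss).reverse.take (c2 :: ss).length = (c2 :: ss).reverse := by
        rw [List.reverse_append,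
            List.take_append_of_le_length (by simp)]
        rw [List.take_of_length_le (by simp)]
      have hb1 : (c2 :: ss).length ≤ (t ++ c1 :: l₂').reverse.length := by
        simp only [List.length_reverse, List.length_append, List.length_cons]; omega
      have hb2 : (c2 :: ss).length ≤ (t ++ c2 :: ss).reverse.length := by
        simp only [List.length_reverse, List.length_append, List.length_cons]; omega
      have hiff0 := take_eq_iff_le_bMatchLen (t ++ c1 :: l₂').reverse
        (t ++ c2 :: ss).reverse (c2 :: ss).length hb1 hb2
      rw [hrevl, hrevs] at hiff0
      have hiff :
          (l₂' = c2 :: ss) ↔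
            (c2 :: ss).length ≤ bMatchLen (t ++ c1 :: l₂').reverse (t ++ c2 :: ss).reverse := by
        rw [← hiff0]
        constructor
        · intro hx; rw [hx]
        · intro hx; exact List.reverse_injective hx
      have hn : (t ++ c2 :: ss).length = t.length + (c2 :: ss).length := by simp
      rw [show ((l₂' == c2 :: ss) : Bool) = decide (l₂' = c2 :: ss) from by
            by_cases hx : l₂' = c2 :: ss <;> simp [hx]]
      rw [decide_eq_decide]
      rw [hiff, ← ht, hn]
      omega

-- ===== VERDICT (by name: the statement is the Claim_ definition above) =====
theorem equalsWhenOneCharRemoved_spec : Claim_equal_equalsWhenOneCharRemoved := by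
  intro x y _
  unfold Spec_equalsWhenOneCharRemoved equalsWhenOneCharRemoved equalsWhenOneCharRemoved_alt
  by_cases heq : x.length = y.length
  · simp [heq]
  · by_cases hgt : ((x.length : Int) - (y.length : Int)).natAbs > 1
    · have hne : ((x.length : Int) - (y.length : Int)).natAbs ≠ 1 := by omega
      simp only [if_neg heq, if_pos hgt, if_pos hne]
    · have h1 : ((x.length : Int) - (y.length : Int)).natAbs = 1 := by omega
      have hone : ¬ ((x.length : Int) - (y.length : Int)).natAbs ≠ 1 := by omega
      simp only [if_neg heq, if_neg hgt, if_neg hone]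
      by_cases hlt : x.length > y.length
      · simp only [if_pos hlt]
        rw [ewocrLoop_eq_counts x.toList y.toList (by simp only [String.length_toList]; omega)]
        simp [String.length_toList]
      · simp only [if_neg hlt]
        rw [ewocrLoop_eq_counts y.toList x.toList (by simp only [String.length_toList]; omega)]
        simp [String.length_toList]
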